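-- pv_equiv track=rewrite | github.com/IevgenZiuzin/python_practs | Pract14/task01.py | sum_between_first_last_positive
-- ===== SOURCE A (Python) =====
-- def sum_between_first_last_positive(collection: list):
--     start = 0
--     end = 0
--     for i in collection:
--         if i > 0:
--             start = collection.index(i) + 1
--             break
--     for i in collection[::-1]:
--         if i > 0:
--             end = len(collection) - collection[::-1].index(i) - 1
--             break
--     return sum(collection[start:end])
-- ===== SOURCE B (Python) =====
-- def sum_between_first_last_positive(collection: list):
--     idx = [i for i, v in enumerate(collection) if v > 0]
--     if not idx:
--         return 0
--     return sum(collection[idx[0] + 1:idx[-1]])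
-- ===== Notes on version B (the rewrite author's own statement) =====
-- stated objective: simpler
-- what changed: One forward pass collects the indices of positive elements, then a single slice strictly between the first and last positive index is summed; A's two break-scans (one over collection[::-1]) and its value-based .index() searches disappear.
import Mathlib
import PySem

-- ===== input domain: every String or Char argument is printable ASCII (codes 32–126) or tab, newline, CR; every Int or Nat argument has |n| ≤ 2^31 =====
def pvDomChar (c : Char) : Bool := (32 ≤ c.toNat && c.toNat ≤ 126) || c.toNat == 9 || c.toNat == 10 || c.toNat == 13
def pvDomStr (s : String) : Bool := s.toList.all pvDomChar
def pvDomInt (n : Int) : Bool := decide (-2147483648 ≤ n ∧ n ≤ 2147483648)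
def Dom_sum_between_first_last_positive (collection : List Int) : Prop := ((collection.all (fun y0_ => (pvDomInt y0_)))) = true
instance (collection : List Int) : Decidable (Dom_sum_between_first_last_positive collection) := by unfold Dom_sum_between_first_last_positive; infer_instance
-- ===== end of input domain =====

-- B replaces A's two break-scans (the second over collection[::-1]) by one pass that
-- collects the positive indices, then sums the slice strictly between first and last: simpler.

-- ===== PORT A =====
-- 'for i in collection: if i > 0: start = collection.index(i) + 1; break' else start stays 0.
-- collection.index(i) cannot raise here (i is drawn from collection), so the 'none' arm is unreachable.
def pvLoopStart (collection : List Int) : List Int → Int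
  | [] => 0
  | i :: rest =>
    if i > 0 then
      match PySem.List.index? collection i with
      | some k => (k : Int) + 1
      | none => 0
    else pvLoopStart collection rest

-- 'for i in collection[::-1]: if i > 0: end = len(collection) - collection[::-1].index(i) - 1; break'.
-- collection[::-1] is collection.reverse (PySem.List.slice?_none_none_neg_one); the index is again always found.
def pvLoopEnd (collection : List Int) : List Int → Int
  | [] => 0
  | i :: rest =>
    if i > 0 then
      match PySem.List.index? collection.reverse i with
      | some k => (collection.length : Int) - (k : Int) - 1
      | none => 0
    else pvLoopEnd collection rest

def sum_between_first_last_positive (collection : List Int) : Int :=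
  let start := pvLoopStart collection collection
  let end_ := pvLoopEnd collection collection.reverse
  (PySem.List.slice collection (some start) (some end_)).sum

-- ===== PORT B =====
-- '[i for i, v in enumerate(collection) if v > 0]'
def pvPosIdx (collection : List Int) (s : Int) : List Int :=
  ((PySem.List.enumerate collection s).filter (fun p => decide (p.2 > 0))).map Prod.fst

def sum_between_first_last_positive_alt (collection : List Int) : Int :=
  match h : pvPosIdx collection 0 with
  | [] => 0
  | a :: t => (PySem.List.slice collection (some (a + 1)) (some ((a :: t).getLast (by simp)))).sum

-- ===== PRECONDITION & SPEC =====
def Spec_sum_between_first_last_positive (collection : List Int) (out : Int) : Prop := out = sum_between_first_last_positive_alt collection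
instance (collection : List Int) (out : Int) : Decidable (Spec_sum_between_first_last_positive collection out) := by unfold Spec_sum_between_first_last_positive; infer_instance

-- ===== CLAIM (what is proved, stated in full; the proofs are below) =====
def Claim_equal_sum_between_first_last_positive : Prop := ∀ (collection : List Int), Dom_sum_between_first_last_positive collection → Spec_sum_between_first_last_positive collection (sum_between_first_last_positive collection)

-- ===== LEMMAS AND PROOFS =====

-- positive-index list of a list with no positive element is empty
theorem pvPosIdx_nil_of_nopos (l : List Int) (s : Int) (h : ∀ x ∈ l, ¬ 0 < x) :
    pvPosIdx l s = [] := by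
  unfold pvPosIdx
  rw [List.filter_eq_nil_iff.mpr, List.map_nil]
  intro p hp
  rcases (PySem.List.mem_enumerate_iff _ _ _).1 hp with ⟨k, hk, rfl⟩
  simpa using h _ (List.getElem_mem hk)

theorem pvPosIdx_append (l₁ l₂ : List Int) (s : Int) :
    pvPosIdx (l₁ ++ l₂) s = pvPosIdx l₁ s ++ pvPosIdx l₂ (s + l₁.length) := by
  unfold pvPosIdx
  rw [PySem.List.enumerate_append, List.filter_append, List.map_append]

theorem pvPosIdx_cons (a : Int) (l : List Int) (s : Int) :
    pvPosIdx (a :: l) s = (if 0 < a then [s] else []) ++ pvPosIdx l (s + 1) := by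
  unfold pvPosIdx
  rw [PySem.List.enumerate_cons, List.filter_cons]
  by_cases h : 0 < a <;> simp [h]

-- the start loop skips a positive-free prefix
theorem pvLoopStart_skip (c : List Int) (p r : List Int) (hp : ∀ y ∈ p, ¬ 0 < y) :
    pvLoopStart c (p ++ r) = pvLoopStart c r := by
  induction p with
  | nil => rfl
  | cons a q ih =>
    have ha : ¬ a > 0 := hp a (by simp)
    simp only [List.cons_append, pvLoopStart, if_neg ha]
    exact ih (fun y hy => hp y (by simp [hy]))

theorem pvLoopEnd_skip (c : List Int) (p r : List Int) (hp : ∀ y ∈ p, ¬ 0 < y) :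
    pvLoopEnd c (p ++ r) = pvLoopEnd c r := by
  induction p with
  | nil => rfl
  | cons a q ih =>
    have ha : ¬ a > 0 := hp a (by simp)
    simp only [List.cons_append, pvLoopEnd, if_neg ha]
    exact ih (fun y hy => hp y (by simp [hy]))

-- first occurrence of the first positive element is its own position
theorem pvIndex_first (p : List Int) (x : Int) (s : List Int)
    (hp : ∀ y ∈ p, ¬ 0 < y) (hx : 0 < x) :
    PySem.List.index? (p ++ x :: s) x = some p.length := by
  exact (PySem.List.index?_eq_some_iff _ _ _).mpr ⟨p, s, rfl, rfl, fun hmem => hp x hmem hx⟩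

-- decompose a list at its first positive element
theorem pvExistsFirst (c : List Int) (h : ∃ x ∈ c, 0 < x) :
    ∃ p x s, c = p ++ x :: s ∧ (∀ y ∈ p, ¬ 0 < y) ∧ 0 < x := by
  induction c with
  | nil => simp at h
  | cons a l ih =>
    by_cases ha : 0 < a
    · exact ⟨[], a, l, rfl, by simp, ha⟩
    · rcases h with ⟨x, hx, hxp⟩
      have hxl : x ∈ l := by
        rcases List.mem_cons.1 hx with rfl | h'
        · exact absurd hxp ha
        · exact h'
      rcases ih ⟨x, hxl, hxp⟩ with ⟨p, y, s, rfl, hp, hy⟩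
      exact ⟨a :: p, y, s, rfl, by
        intro z hz
        rcases List.mem_cons.1 hz with rfl | h'
        · exact ha
        · exact hp z h', hy⟩

-- ===== VERDICT (by name: the statement is the Claim_ definition above) =====
theorem sum_between_first_last_positive_spec : Claim_equal_sum_between_first_last_positive := by
  intro c _
  unfold Spec_sum_between_first_last_positive
  by_cases hpos : ∃ x ∈ c, 0 < x
  · -- decompose at the first positive element of c …
    rcases pvExistsFirst c hpos with ⟨p, x, s, hc, hp, hx⟩
    subst hc
    -- … and at the first positive element of the reverse (= last positive of c)
    have hposr : ∃ z ∈ (p ++ x :: s).reverse, 0 < z := by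
      rcases hpos with ⟨z, hz, hz'⟩; exact ⟨z, List.mem_reverse.2 hz, hz'⟩
    rcases pvExistsFirst _ hposr with ⟨q, y, t, hcr, hq, hy⟩
    have hc2 : p ++ x :: s = t.reverse ++ y :: q.reverse := by
      have := congrArg List.reverse hcr
      simpa using this
    -- A's start = p.length + 1
    have hstart : pvLoopStart (p ++ x :: s) (p ++ x :: s) = (p.length : Int) + 1 := by
      rw [pvLoopStart_skip _ p (x :: s) hp]
      simp only [pvLoopStart, if_pos hx]
      rw [pvIndex_first p x s hp hx]
    -- A's end = t.length
    have hlen : (p ++ x :: s).length = t.length + 1 + q.length := by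
      rw [hc2]; simp [Nat.add_comm]; omega
    have hend : pvLoopEnd (p ++ x :: s) (p ++ x :: s).reverse = (t.length : Int) := by
      rw [hcr, pvLoopEnd_skip _ q (y :: t) hq]
      simp only [pvLoopEnd, if_pos hy]
      rw [hcr, pvIndex_first q y t hq hy]
      simp only [hlen]
      push_cast
      ring
    -- B's index list, described from each end
    have hidx1 : pvPosIdx (p ++ x :: s) 0 = (p.length : Int) :: pvPosIdx s ((p.length : Int) + 1) := by
      rw [pvPosIdx_append, pvPosIdx_nil_of_nopos p 0 hp, pvPosIdx_cons, if_pos hx]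
      simp
    have hidx2 : pvPosIdx (p ++ x :: s) 0 = pvPosIdx t.reverse 0 ++ [(t.length : Int)] := by
      rw [hc2, pvPosIdx_append, pvPosIdx_cons, if_pos hy]
      rw [pvPosIdx_nil_of_nopos q.reverse _ (fun z hz => hq z (List.mem_reverse.1 hz))]
      simp
    -- evaluate both sides
    simp only [sum_between_first_last_positive, hstart, hend]
    unfold sum_between_first_last_positive_alt
    split
    · next heq => exact absurd (hidx1.symm.trans heq) (by simp)
    · next a u heq =>
      injection hidx1.symm.trans heq with h1 h2
      have hlast : (a :: u).getLast (by simp) = (t.length : Int) := by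
        have hsome : (a :: u).getLast? = some ((t.length : Int)) := by
          rw [← heq, hidx2, List.getLast?_concat]
        exact Option.some.inj ((List.getLast?_eq_some_getLast (by simp)).symm.trans hsome)
      rw [hlast, ← h1]
  · -- no positive element: both programs return 0
    push Not at hpos
    have hA0 : pvLoopStart c c = 0 := by
      have := pvLoopStart_skip c c [] (fun y hy => by simpa using hpos y hy)
      simpa using this
    have hB0 : pvLoopEnd c c.reverse = 0 := by
      have := pvLoopEnd_skip c c.reverse []
        (fun y hy => by simpa using hpos y (List.mem_reverse.1 hy))
      simpa using this
    simp only [sum_between_first_last_positive, hA0, hB0]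
    unfold sum_between_first_last_positive_alt
    rw [pvPosIdx_nil_of_nopos c 0 (fun y hy => by simpa using hpos y hy)]
    have hsl : PySem.List.slice c (some (0 : Int)) (some (0 : Int)) = [] := by
      have := PySem.List.slice_natCast (xs := c) (a := 0) (b := 0)
      simpa using this
    simp [hsl]
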